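-- pv_equiv track=rewrite | github.com/madisonsilver/SeedlingHaxe | float_error_fixer.py | extract_name_and_files
-- ===== SOURCE A (Python) =====
-- def extract_name_and_files(errors):
--     formatted_errors = {}
--     for (file, line_raw, data) in errors:
--         line = int(line_raw)
--         if file not in formatted_errors:
--             formatted_errors[file] = {}
--         if line not in formatted_errors[file]:
--             formatted_errors[file][line] = []
--         formatted_errors[file][line].append(data)
--     return formatted_errors
-- ===== SOURCE B (Python) =====
-- def extract_name_and_files(errors):
--     rows = [(f, int(l), d) for (f, l, d) in errors]
--     files = list(dict.fromkeys(f for (f, _, _) in rows))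
--     return {f: {l: [d for (g, m, d) in rows if g == f and m == l]
--                 for l in dict.fromkeys(m for (g, m, _) in rows if g == f)}
--             for f in files}
-- ===== Notes on version B (the rewrite author's own statement) =====
-- stated objective: alternative
-- what changed: A builds the nested dict incrementally, mutating per-row; B is declarative: it dedups the file names once, then for each file dedups its lines and collects each group's data by filtering the preprocessed rows.
import Mathlib
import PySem

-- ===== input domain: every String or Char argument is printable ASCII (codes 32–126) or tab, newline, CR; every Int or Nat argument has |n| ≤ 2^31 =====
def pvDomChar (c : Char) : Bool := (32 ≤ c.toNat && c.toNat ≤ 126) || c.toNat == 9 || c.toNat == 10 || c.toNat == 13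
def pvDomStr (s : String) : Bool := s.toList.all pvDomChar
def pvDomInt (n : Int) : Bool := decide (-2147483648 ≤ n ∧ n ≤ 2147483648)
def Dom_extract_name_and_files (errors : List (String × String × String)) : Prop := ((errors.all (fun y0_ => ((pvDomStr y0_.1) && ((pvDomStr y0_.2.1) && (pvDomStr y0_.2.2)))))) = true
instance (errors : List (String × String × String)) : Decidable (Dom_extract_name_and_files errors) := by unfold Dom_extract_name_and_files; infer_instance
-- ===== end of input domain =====

-- B replaces A's incremental nested-dict mutation by a declarative build: dedup the file
-- names once, then for each file dedup its lines and collect each group's data by filtering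
-- (objective: alternative decomposition; not faster).

-- ===== PORT A =====
-- A's loop: for each (file, line_raw, data), ensure formatted_errors[file] exists, ensure
-- formatted_errors[file][line] exists, append data; int(line_raw) raising is outside Pre_
-- (the port reads it with getD 0 there, a value the claim never covers).
def extract_name_and_files (errors : List (String × String × String)) : List (String × List (Int × List String)) :=
  let d := errors.foldl (fun d e =>
    let file := e.1
    let line := (PySem.Int.ofStr? e.2.1).getD 0
    let data := e.2.2
    let d := if d.contains file then d else d.insert file PySem.Dict.empty
    let inner := d.getD file PySem.Dict.empty
    let inner := if inner.contains line then inner else inner.insert line []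
    let inner := inner.modify line [] (fun l => l ++ [data])
    d.insert file inner) PySem.Dict.empty
  d.items.map (fun p => (p.1, p.2.items))

-- ===== PORT B =====
-- Source B: rows = [(f, int(l), d) …]; files = list(dict.fromkeys(…)); nested comprehensions with filters.
def extract_name_and_files_alt (errors : List (String × String × String)) : List (String × List (Int × List String)) :=
  let rows := errors.map (fun e => (e.1, ((PySem.Int.ofStr? e.2.1).getD 0, e.2.2)))
  let files := PySem.List.dedup (rows.map (fun r => r.1))
  files.map (fun f =>
    (f, (PySem.List.dedup ((rows.filter (fun r => r.1 == f)).map (fun r => r.2.1))).map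
        (fun l => (l, ((rows.filter (fun r => r.1 == f && r.2.1 == l)).map (fun r => r.2.2))))))

-- ===== PRECONDITION & SPEC =====
-- Pre_ excludes exactly the inputs where Python's int(line_raw) raises ValueError (A returns no value there).
def Pre_extract_name_and_files (errors : List (String × String × String)) : Prop :=
  ∀ e ∈ errors, (PySem.Int.ofStr? e.2.1).isSome = true
instance (errors : List (String × String × String)) : Decidable (Pre_extract_name_and_files errors) := by unfold Pre_extract_name_and_files; infer_instance
def pvWitness_extract_name_and_files : (List (String × String × String)) :=
  [("a.hx", "3", "unexpected ;"), ("a.hx", "3", "missing )"), ("b.hx", "12", "oops")]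

def Spec_extract_name_and_files (errors : List (String × String × String)) (out : List (String × List (Int × List String))) : Prop := out = extract_name_and_files_alt errors
instance (errors : List (String × String × String)) (out : List (String × List (Int × List String))) : Decidable (Spec_extract_name_and_files errors out) := by unfold Spec_extract_name_and_files; infer_instance

-- ===== CLAIM (what is proved, stated in full; the proofs are below) =====
def Claim_equal_extract_name_and_files : Prop := ∀ (errors : List (String × String × String)), Dom_extract_name_and_files errors → Pre_extract_name_and_files errors → Spec_extract_name_and_files errors (extract_name_and_files errors)

-- ===== LEMMAS AND PROOFS =====

-- the preprocessed rows both ports work over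
def pvRows (errors : List (String × String × String)) : List (String × Int × String) :=
  errors.map (fun e => (e.1, ((PySem.Int.ofStr? e.2.1).getD 0, e.2.2)))

-- A's body of its loop, after substituting the lets
def pvStepA (d : PySem.Dict String (PySem.Dict Int (List String))) (r : String × Int × String) :
    PySem.Dict String (PySem.Dict Int (List String)) :=
  let d' := if d.contains r.1 then d else d.insert r.1 PySem.Dict.empty
  let inner := d'.getD r.1 PySem.Dict.empty
  let inner := if inner.contains r.2.1 then inner else inner.insert r.2.1 []
  (d'.insert r.1 (inner.modify r.2.1 [] (fun l => l ++ [r.2.2])))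

-- ensure-then-append on the inner dict is exactly Dict.modify with default []
lemma pvInner_eq_modify (i : PySem.Dict Int (List String)) (l : Int) (s : String) :
    (if i.contains l then i else i.insert l []).modify l [] (fun xs => xs ++ [s])
      = i.modify l [] (fun xs => xs ++ [s]) := by
  by_cases h : i.contains l = true
  · simp [h]
  · simp [h, PySem.Dict.modify, PySem.Dict.getD_insert_self,
      PySem.Dict.insert_insert_self,
      PySem.Dict.getD_of_not_contains i ([] : List String) (by simpa using h)]

-- A's step is a single outer modify
lemma pvStepA_eq_modify (d : PySem.Dict String (PySem.Dict Int (List String)))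
    (r : String × Int × String) :
    pvStepA d r = d.modify r.1 PySem.Dict.empty (fun i => i.modify r.2.1 [] (fun xs => xs ++ [r.2.2])) := by
  unfold pvStepA
  by_cases h : d.contains r.1 = true
  · simp only [h, if_true]
    rw [pvInner_eq_modify]
    simp [PySem.Dict.modify]
  · simp only [h, Bool.false_eq_true, if_false]
    rw [pvInner_eq_modify]
    have hb : d.contains r.1 = false := by simpa using h
    simp [PySem.Dict.modify, PySem.Dict.getD_insert_self,
      PySem.Dict.insert_insert_self, PySem.Dict.getD_of_not_contains, hb]

def pvOuterStep (d : PySem.Dict String (PySem.Dict Int (List String))) (r : String × Int × String) :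
    PySem.Dict String (PySem.Dict Int (List String)) :=
  d.modify r.1 PySem.Dict.empty (fun i => i.modify r.2.1 [] (fun xs => xs ++ [r.2.2]))

-- per-file content of the outer fold
lemma pvOuter_getD (rows : List (String × Int × String))
    (d : PySem.Dict String (PySem.Dict Int (List String))) (f : String) :
    (rows.foldl pvOuterStep d).getD f PySem.Dict.empty
      = ((rows.filter (fun r => r.1 == f)).map (fun r => r.2)).foldl
          (fun i p => i.modify p.1 [] (fun xs => xs ++ [p.2])) (d.getD f PySem.Dict.empty) := by
  induction rows generalizing d with
  | nil => simp
  | cons r t ih =>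
    simp only [List.foldl_cons, List.filter_cons]
    rw [ih]
    by_cases h : r.1 = f
    · simp [pvOuterStep, h, PySem.Dict.getD_modify_self]
    · have : (r.1 == f) = false := by simp [h]
      have hne : f ≠ r.1 := Ne.symm h
      simp [pvOuterStep, this, PySem.Dict.getD_modify_of_ne, hne]

theorem extract_name_and_files_agree (errors : List (String × String × String)) :
    extract_name_and_files errors = extract_name_and_files_alt errors := by
  unfold extract_name_and_files extract_name_and_files_alt
  have hfold : errors.foldl (fun d e =>
      let file := e.1
      let line := (PySem.Int.ofStr? e.2.1).getD 0
      let data := e.2.2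
      let d := if d.contains file then d else d.insert file PySem.Dict.empty
      let inner := d.getD file PySem.Dict.empty
      let inner := if inner.contains line then inner else inner.insert line []
      let inner := inner.modify line [] (fun l => l ++ [data])
      d.insert file inner) PySem.Dict.empty
      = (pvRows errors).foldl pvOuterStep PySem.Dict.empty := by
    unfold pvRows
    rw [List.foldl_map]
    congr 1
    funext d e
    exact pvStepA_eq_modify d (e.1, ((PySem.Int.ofStr? e.2.1).getD 0, e.2.2))
  simp only [hfold]
  -- outer keys
  have hkeys : ((pvRows errors).foldl pvOuterStep PySem.Dict.empty).keys
      = PySem.List.dedup ((pvRows errors).map (fun r => r.1)) := by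
    have := PySem.Dict.keys_foldl_modify_key (pvRows errors) (fun r => r.1)
      PySem.Dict.empty (fun _ r i => i.modify r.2.1 [] (fun xs => xs ++ [r.2.2]))
      (PySem.Dict.empty : PySem.Dict String (PySem.Dict Int (List String)))
    simpa [pvOuterStep, PySem.Dict.keys_empty, PySem.Set.update,
      PySem.Set.ofList_eq_foldl] using this
  have hnod : ((pvRows errors).foldl pvOuterStep PySem.Dict.empty).keys.Nodup := by
    rw [hkeys]; exact PySem.List.nodup_dedup _
  rw [PySem.Dict.items_eq_map_keys _ hnod PySem.Dict.empty, hkeys]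
  have hrowseq : errors.map (fun e => (e.1, ((PySem.Int.ofStr? e.2.1).getD 0, e.2.2)))
      = pvRows errors := rfl
  rw [hrowseq, List.map_map]
  apply List.map_congr_left
  intro f _
  simp only [Function.comp]
  congr 1
  -- inner dict for file f
  rw [pvOuter_getD]
  have hik : ((((pvRows errors).filter (fun r => r.1 == f)).map (fun r => r.2)).foldl
        (fun i p => i.modify p.1 [] (fun xs => xs ++ [p.2]))
        (PySem.Dict.empty.getD f PySem.Dict.empty)).keys
      = PySem.List.dedup ((((pvRows errors).filter (fun r => r.1 == f)).map (fun r => r.2)).map (fun p => p.1)) := by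
    have := PySem.Dict.keys_foldl_modify_key
      (((pvRows errors).filter (fun r => r.1 == f)).map (fun r => r.2)) (fun p => p.1)
      ([] : List String) (fun _ p xs => xs ++ [p.2])
      (PySem.Dict.empty : PySem.Dict Int (List String))
    simpa [PySem.Dict.getD_empty, PySem.Dict.keys_empty, PySem.Set.update,
      PySem.Set.ofList_eq_foldl] using this
  have hinod : ((((pvRows errors).filter (fun r => r.1 == f)).map (fun r => r.2)).foldl
        (fun i p => i.modify p.1 [] (fun xs => xs ++ [p.2]))
        (PySem.Dict.empty.getD f PySem.Dict.empty)).keys.Nodup := by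
    rw [hik]; exact PySem.List.nodup_dedup _
  rw [PySem.Dict.items_eq_map_keys _ hinod [], hik]
  have hlines : (((pvRows errors).filter (fun r => r.1 == f)).map (fun r => r.2)).map (fun p => p.1)
      = ((pvRows errors).filter (fun r => r.1 == f)).map (fun r => r.2.1) := by
    rw [List.map_map]; rfl
  rw [hlines]
  apply List.map_congr_left
  intro l _
  congr 1
  rw [PySem.Dict.getD_foldl_modify_append]
  simp only [PySem.Dict.getD_empty, List.nil_append, List.filter_map,
    List.map_map, List.filter_filter, Function.comp]
  congr 1
  apply List.filter_congr
  intro r _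
  simp [Bool.and_comm]

-- ===== VERDICT (by name: the statement is the Claim_ definition above) =====
theorem extract_name_and_files_spec : Claim_equal_extract_name_and_files := by
  intro errors _ _
  unfold Spec_extract_name_and_files
  exact extract_name_and_files_agree errors
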